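-- pv_equiv track=rewrite | github.com/jianbangzhang/anno_platform | agent/utils/utils.py | parse_llm_out
-- ===== SOURCE A (Python) =====
-- def getMsgFromText(text,token,filter_token):
--     """
--     :param text:
--     :param token:
--     :param filter_token:
--     :return:
--     """
--     res=""
--     text=text.replace("：",":").strip()
--     if token in text:
--         for line in text.split("\n"):
--             line=line.strip()
--             if line.startswith(token):
--                 res+=line
--             else:
--                 continue
--
--         if filter_token:
--             res=res.replace(token,"").strip()
--     else:
--         res=text
--     return res
--
-- def parse_llm_out(llm_out,one_dict):
--     if all(True if token in llm_out else False for token in ["Thought", "Action", "Action_Parameter"]):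
--         thought = getMsgFromText(llm_out, "Thought:", filter_token=True)
--         action = getMsgFromText(llm_out, "Action:", filter_token=True)
--         action_parameter = getMsgFromText(llm_out, "Action_Parameter:", filter_token=True)
--         one_dict["Thought"] =thought
--         one_dict["Action"] =action
--         one_dict["Action_Parameter"]= action_parameter
--
--     if all(True if token in llm_out else False for token in ["Thought", "Finish"]):
--         thought = getMsgFromText(llm_out, "Thought:", filter_token=True)
--         finish = getMsgFromText(llm_out, "Finish:", filter_token=True)
--         one_dict["Thought"]=thought
--         one_dict["Finish"]= finish
--     return one_dict
-- ===== SOURCE B (Python) =====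
-- def parse_llm_out(llm_out, one_dict):
--     text = llm_out.replace("\uff1a", ":").strip()
--     prefixes = ["Thought:", "Action:", "Action_Parameter:", "Finish:"]
--     acc = {p: "" for p in prefixes}
--     for raw in text.split("\n"):
--         line = raw.strip()
--         for p in prefixes:
--             if line.startswith(p):
--                 acc[p] += line
--     def field(p):
--         return acc[p].replace(p, "").strip() if p in text else text
--     if all(t in llm_out for t in ("Thought", "Action", "Action_Parameter")):
--         one_dict["Thought"] = field("Thought:")
--         one_dict["Action"] = field("Action:")
--         one_dict["Action_Parameter"] = field("Action_Parameter:")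
--     if all(t in llm_out for t in ("Thought", "Finish")):
--         one_dict["Thought"] = field("Thought:")
--         one_dict["Finish"] = field("Finish:")
--     return one_dict
-- ===== Notes on version B (the rewrite author's own statement) =====
-- stated objective: simpler
-- what changed: B normalizes and splits the text once and collects all four prefixed-line accumulators in a single pass over the lines, instead of A's four getMsgFromText calls that each re-normalize, re-split and re-scan the whole text.
import Mathlib
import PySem

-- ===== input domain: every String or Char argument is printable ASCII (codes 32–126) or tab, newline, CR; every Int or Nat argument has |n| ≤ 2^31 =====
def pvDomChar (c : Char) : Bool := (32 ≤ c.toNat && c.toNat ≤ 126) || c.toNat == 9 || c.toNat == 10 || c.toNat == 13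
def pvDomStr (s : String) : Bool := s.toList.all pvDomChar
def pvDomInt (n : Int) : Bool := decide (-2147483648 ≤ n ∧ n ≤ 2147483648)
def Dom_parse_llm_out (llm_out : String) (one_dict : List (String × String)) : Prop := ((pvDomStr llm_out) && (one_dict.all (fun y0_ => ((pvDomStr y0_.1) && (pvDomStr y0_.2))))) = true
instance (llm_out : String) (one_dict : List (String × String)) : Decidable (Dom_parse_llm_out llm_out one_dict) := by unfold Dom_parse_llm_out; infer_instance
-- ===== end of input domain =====

-- B normalizes/splits the text once and accumulates all four prefixed-line buffers in one pass,
-- instead of A's four getMsgFromText calls, each re-scanning the whole text (objective: simpler).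
-- Both Pythons mutate one_dict in place and return it; the equivalence proved is about the return value
-- (B performs the same mutation as A).

-- ===== PORT A =====
-- helper of A, transliterated (always called with filter_token = true by parse_llm_out)
def getMsgFromText (text token : String) (filter_token : Bool) : String :=
  let res : List Char := []
  let t := PySem.Chars.strip (PySem.Chars.replace text.toList "：".toList ":".toList)
  if PySem.Chars.isIn token.toList t then
    let res := (PySem.Chars.splitOn t "\n".toList).foldl (fun res line =>
      let line := PySem.Chars.strip line
      if PySem.Chars.startswith line token.toList then res ++ line else res) res
    let res := if filter_token then PySem.Chars.strip (PySem.Chars.replace res token.toList []) else res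
    String.ofList res
  else String.ofList t

def parse_llm_out (llm_out : String) (one_dict : List (String × String)) : List (String × String) :=
  let d := PySem.Dict.ofList one_dict
  let d := if ["Thought", "Action", "Action_Parameter"].all (fun tok => PySem.Str.isIn tok llm_out) then
      let thought := getMsgFromText llm_out "Thought:" true
      let action := getMsgFromText llm_out "Action:" true
      let action_parameter := getMsgFromText llm_out "Action_Parameter:" true
      ((d.insert "Thought" thought).insert "Action" action).insert "Action_Parameter" action_parameter
    else d
  let d := if ["Thought", "Finish"].all (fun tok => PySem.Str.isIn tok llm_out) then
      let thought := getMsgFromText llm_out "Thought:" true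
      let finish := getMsgFromText llm_out "Finish:" true
      (d.insert "Thought" thought).insert "Finish" finish
    else d
  d.items

-- ===== PORT B =====
-- 'if line.startswith(p): acc[p] += line' for one prefix p
def pvStep (tok acc line : List Char) : List Char :=
  if PySem.Chars.startswith line tok then acc ++ line else acc

-- acc[p].replace(p, "").strip() if p in text else text
def pvField (text tok acc : List Char) : String :=
  if PySem.Chars.isIn tok text then String.ofList (PySem.Chars.strip (PySem.Chars.replace acc tok []))
  else String.ofList text

def parse_llm_out_alt (llm_out : String) (one_dict : List (String × String)) : List (String × String) :=
  let text := PySem.Chars.strip (PySem.Chars.replace llm_out.toList "：".toList ":".toList)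
  let tT := "Thought:".toList
  let tA := "Action:".toList
  let tP := "Action_Parameter:".toList
  let tF := "Finish:".toList
  let acc := (PySem.Chars.splitOn text "\n".toList).foldl
    (fun (acc : List Char × List Char × List Char × List Char) raw =>
      let line := PySem.Chars.strip raw
      (pvStep tT acc.1 line, pvStep tA acc.2.1 line, pvStep tP acc.2.2.1 line, pvStep tF acc.2.2.2 line))
    ([], [], [], [])
  let d := PySem.Dict.ofList one_dict
  let d := if ["Thought", "Action", "Action_Parameter"].all (fun tok => PySem.Str.isIn tok llm_out) then
      ((d.insert "Thought" (pvField text tT acc.1)).insert "Action" (pvField text tA acc.2.1)).insert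
        "Action_Parameter" (pvField text tP acc.2.2.1)
    else d
  let d := if ["Thought", "Finish"].all (fun tok => PySem.Str.isIn tok llm_out) then
      (d.insert "Thought" (pvField text tT acc.1)).insert "Finish" (pvField text tF acc.2.2.2)
    else d
  d.items

-- ===== PRECONDITION & SPEC =====
def Spec_parse_llm_out (llm_out : String) (one_dict : List (String × String)) (out : List (String × String)) : Prop := out = parse_llm_out_alt llm_out one_dict
instance (llm_out : String) (one_dict : List (String × String)) (out : List (String × String)) : Decidable (Spec_parse_llm_out llm_out one_dict out) := by unfold Spec_parse_llm_out; infer_instance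

-- ===== CLAIM (what is proved, stated in full; the proofs are below) =====
def Claim_equal_parse_llm_out : Prop := ∀ (llm_out : String) (one_dict : List (String × String)), Dom_parse_llm_out llm_out one_dict → Spec_parse_llm_out llm_out one_dict (parse_llm_out llm_out one_dict)

-- ===== LEMMAS AND PROOFS =====

-- B's single four-accumulator fold is componentwise A's four per-token folds
theorem pv_fold_split (lines : List (List Char)) (tT tA tP tF : List Char)
    (a b c d : List Char) :
    lines.foldl
      (fun (acc : List Char × List Char × List Char × List Char) raw =>
        let line := PySem.Chars.strip raw
        (pvStep tT acc.1 line, pvStep tA acc.2.1 line, pvStep tP acc.2.2.1 line, pvStep tF acc.2.2.2 line))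
      (a, b, c, d)
    = (lines.foldl (fun acc raw => pvStep tT acc (PySem.Chars.strip raw)) a,
       lines.foldl (fun acc raw => pvStep tA acc (PySem.Chars.strip raw)) b,
       lines.foldl (fun acc raw => pvStep tP acc (PySem.Chars.strip raw)) c,
       lines.foldl (fun acc raw => pvStep tF acc (PySem.Chars.strip raw)) d) := by
  induction lines generalizing a b c d with
  | nil => rfl
  | cons x xs ih => simp only [List.foldl_cons]; exact ih _ _ _ _

-- A's helper is B's pvField applied to B's accumulator component
theorem pv_getMsg_eq (s : String) (tok : String) :
    getMsgFromText s tok true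
    = pvField (PySem.Chars.strip (PySem.Chars.replace s.toList "：".toList ":".toList)) tok.toList
        ((PySem.Chars.splitOn (PySem.Chars.strip (PySem.Chars.replace s.toList "：".toList ":".toList)) "\n".toList).foldl
          (fun acc raw => pvStep tok.toList acc (PySem.Chars.strip raw)) []) := by
  simp only [getMsgFromText, pvField, pvStep, if_true]

-- ===== VERDICT (by name: the statement is the Claim_ definition above) =====
theorem parse_llm_out_spec : Claim_equal_parse_llm_out := by
  intro llm_out one_dict _
  unfold Spec_parse_llm_out
  simp only [parse_llm_out, parse_llm_out_alt, pv_fold_split, pv_getMsg_eq]
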